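-- pv_equiv track=rewrite | github.com/pypi-data/pypi-mirror-269 | packages/paicrypto/paicrypto-6.0.tar.gz/paicrypto-6.0/paicrypto/main.py | prepare_playfair_text
-- ===== SOURCE A (Python) =====
-- def prepare_playfair_text(text):
--     result = ""
--     i = 0
--     while i < len(text):
--         result += text[i]
--         if i + 1 < len(text):
--             if text[i] == text[i + 1]:
--                 result += 'X'
--         i += 1
--     if len(result) % 2 != 0:
--         result += 'X'
--     return result
-- ===== SOURCE B (Python) =====
-- import re
--
-- def prepare_playfair_text(text):
--     s = re.sub(r'(?s)(.)(?=\1)', r'\1X', text)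
--     return s + 'X' * (len(s) % 2)
-- ===== Notes on version B (the rewrite author's own statement) =====
-- stated objective: faster
-- what changed: Replaces the index-driven while loop with repeated string concatenation by a single regex substitution (zero-width lookahead inserts 'X' after every character followed by an identical one, DOTALL so newlines compare too) plus arithmetic padding.
import Mathlib
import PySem

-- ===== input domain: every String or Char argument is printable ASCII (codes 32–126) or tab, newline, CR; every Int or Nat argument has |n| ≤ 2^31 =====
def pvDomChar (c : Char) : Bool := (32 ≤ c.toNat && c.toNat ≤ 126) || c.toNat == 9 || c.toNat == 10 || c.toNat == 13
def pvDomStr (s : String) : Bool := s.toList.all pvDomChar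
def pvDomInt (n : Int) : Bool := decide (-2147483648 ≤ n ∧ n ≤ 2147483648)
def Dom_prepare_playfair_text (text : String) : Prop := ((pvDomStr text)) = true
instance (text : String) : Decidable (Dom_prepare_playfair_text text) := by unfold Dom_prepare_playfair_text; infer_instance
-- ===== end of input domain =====

-- B replaces A's index-based while loop by one regex substitution (lookahead inserts 'X'
-- after each character followed by an identical one) plus arithmetic padding; same value on all inputs.

-- ===== PORT A =====
-- while loop over index i; text[i] is always in range (0 ≤ i < len), so the
-- in-range getElem is exact for Python's text[i]; getElem? comparison mirrors
-- text[i] == text[i + 1] (both indices in range at that branch).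
def prepare_playfair_textLoop (cs : List Char) (i : Nat) (result : List Char) : List Char :=
  if h : i < cs.length then
    let result1 := result ++ [cs[i]]
    let result2 :=
      if i + 1 < cs.length then
        if cs[i]? = cs[i + 1]? then result1 ++ ['X'] else result1
      else result1
    prepare_playfair_textLoop cs (i + 1) result2
  else result
termination_by cs.length - i

def prepare_playfair_text (text : String) : String :=
  let result := prepare_playfair_textLoop text.toList 0 []
  let result := if result.length % 2 ≠ 0 then result ++ ['X'] else result
  String.ofList result

-- ===== PORT B =====
-- re.sub(r'(?s)(.)(?=\1)', r'\1X', text): hand-ported exactly — the regex engine scans left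
-- to right, each match consumes ONE character c with a zero-width lookahead that the next
-- character equals c, and is replaced by c followed by 'X'; '.' under DOTALL matches any
-- character, so this is precisely the recursion below.
def reSubDoubleX : List Char → List Char
  | [] => []
  | [a] => [a]
  | a :: b :: t =>
      if a = b then a :: 'X' :: reSubDoubleX (b :: t)
      else a :: reSubDoubleX (b :: t)

def prepare_playfair_text_alt (text : String) : String :=
  let s := reSubDoubleX text.toList
  String.ofList (s ++ List.replicate (s.length % 2) 'X')

-- ===== PRECONDITION & SPEC =====
def Spec_prepare_playfair_text (text : String) (out : String) : Prop := out = prepare_playfair_text_alt text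
instance (text : String) (out : String) : Decidable (Spec_prepare_playfair_text text out) := by unfold Spec_prepare_playfair_text; infer_instance

-- ===== CLAIM (what is proved, stated in full; the proofs are below) =====
def Claim_equal_prepare_playfair_text : Prop := ∀ (text : String), Dom_prepare_playfair_text text → Spec_prepare_playfair_text text (prepare_playfair_text text)

-- ===== LEMMAS AND PROOFS =====

theorem loop_eq_reSub (cs : List Char) (i : Nat) (r : List Char) :
    prepare_playfair_textLoop cs i r = r ++ reSubDoubleX (cs.drop i) := by
  have key : ∀ n i (r : List Char), cs.length - i ≤ n →
      prepare_playfair_textLoop cs i r = r ++ reSubDoubleX (cs.drop i) := by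
    intro n
    induction n with
    | zero =>
        intro i r hn
        have h : ¬ i < cs.length := by omega
        rw [prepare_playfair_textLoop, dif_neg h,
          List.drop_eq_nil_of_le (by omega)]
        simp [reSubDoubleX]
    | succ n ih =>
        intro i r hn
        rw [prepare_playfair_textLoop]
        by_cases h : i < cs.length
        · rw [dif_pos h]
          have hd : cs.drop i = cs[i] :: cs.drop (i + 1) := List.drop_eq_getElem_cons h
          by_cases h1 : i + 1 < cs.length
          · have hd2 : cs.drop (i + 1) = cs[i + 1] :: cs.drop (i + 2) :=
              List.drop_eq_getElem_cons h1
            simp only [ih (i + 1) _ (by omega), hd, hd2, reSubDoubleX, if_pos h1,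
              List.getElem?_eq_getElem h, List.getElem?_eq_getElem h1]
            by_cases he : cs[i] = cs[i + 1] <;> simp [he]
          · have hd2 : cs.drop (i + 1) = [] := List.drop_eq_nil_of_le (by omega)
            simp [ih (i + 1) _ (by omega), hd, hd2, reSubDoubleX, h1]
        · rw [dif_neg h, List.drop_eq_nil_of_le (by omega)]
          simp [reSubDoubleX]
  exact key (cs.length - i) i r le_rfl

-- ===== VERDICT (by name: the statement is the Claim_ definition above) =====
theorem prepare_playfair_text_spec : Claim_equal_prepare_playfair_text := by
  intro text _
  show prepare_playfair_text text = prepare_playfair_text_alt text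
  have hA : prepare_playfair_text text =
      String.ofList (if (reSubDoubleX text.toList).length % 2 ≠ 0
        then reSubDoubleX text.toList ++ ['X'] else reSubDoubleX text.toList) := by
    unfold prepare_playfair_text
    rw [loop_eq_reSub]
    simp
  rw [hA]
  show _ = String.ofList (reSubDoubleX text.toList ++
      List.replicate ((reSubDoubleX text.toList).length % 2) 'X')
  by_cases h : (reSubDoubleX text.toList).length % 2 = 0
  · simp [h]
  · have h1 : (reSubDoubleX text.toList).length % 2 = 1 := by omega
    simp [h1]
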